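-- pv_equiv track=rewrite | github.com/whois-api-llc/web-categorization-v2 | scripts/wxawebcat_classifier_db.py | extract_tld
-- ===== SOURCE A (Python) =====
-- from typing import Any, Dict, List, Optional, Tuple
--
-- def extract_tld(fqdn: str) -> Optional[str]:
--     """Extract TLD from FQDN"""
--     if not fqdn:
--         return None
--
--     fqdn_lower = fqdn.lower()
--
--     for tld in [".gov.uk", ".gov.au", ".gov.ca", ".ac.uk", ".edu.au", ".edu.cn"]:
--         if fqdn_lower.endswith(tld):
--             return tld
--
--     parts = fqdn_lower.split(".")
--     if len(parts) >= 2: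
--         return "." + parts[-1]
--
--     return None
-- ===== SOURCE B (Python) =====
-- from typing import Optional
--
-- _SPECIAL_TLDS = {".gov.uk", ".gov.au", ".gov.ca", ".ac.uk", ".edu.au", ".edu.cn"}
--
-- def extract_tld(fqdn: str) -> Optional[str]:
--     """Extract TLD from FQDN"""
--     if not fqdn:
--         return None
--     parts = fqdn.lower().split(".")
--     if len(parts) >= 3:
--         candidate = "." + parts[-2] + "." + parts[-1]
--         if candidate in _SPECIAL_TLDS:
--             return candidate
--     return "." + parts[-1] if len(parts) >= 2 else None
-- ===== Notes on version B (the rewrite author's own statement) =====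
-- stated objective: simpler
-- what changed: Splits once and tests a single candidate built from the last two labels against a set of the six special suffixes, instead of scanning the string with six endswith calls and then splitting again for the fallback.
import Mathlib
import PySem

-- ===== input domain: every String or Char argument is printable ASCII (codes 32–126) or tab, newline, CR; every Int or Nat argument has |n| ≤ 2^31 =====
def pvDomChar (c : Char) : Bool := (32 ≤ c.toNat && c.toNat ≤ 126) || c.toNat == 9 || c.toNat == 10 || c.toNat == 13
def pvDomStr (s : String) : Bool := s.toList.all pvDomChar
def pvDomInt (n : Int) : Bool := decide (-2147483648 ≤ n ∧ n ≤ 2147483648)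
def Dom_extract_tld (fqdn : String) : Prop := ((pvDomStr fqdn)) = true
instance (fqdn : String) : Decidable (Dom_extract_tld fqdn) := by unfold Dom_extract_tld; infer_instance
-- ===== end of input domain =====

-- B replaces A's six-way endswith scan with one split plus a set-membership test on the
-- candidate built from the last two labels (objective: simpler); return values proved equal.

set_option maxHeartbeats 1000000


-- ===== PORT A =====
-- the six special suffixes, in A's loop order
def pvSpecials : List (List Char) :=
  [".gov.uk".toList, ".gov.au".toList, ".gov.ca".toList,
   ".ac.uk".toList, ".edu.au".toList, ".edu.cn".toList]

-- the 'for tld in [...]: if fqdn_lower.endswith(tld): return tld' loop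
def pvTldLoop (fl : List Char) : List (List Char) → Option (List Char)
  | [] => none
  | t :: ts => if PySem.Chars.endswith fl t then some t else pvTldLoop fl ts

def extract_tld (fqdn : String) : Option String :=
  if fqdn.toList = [] then none
  else
    let fl := PySem.Chars.lower fqdn.toList
    match pvTldLoop fl pvSpecials with
    | some t => some (String.ofList t)
    | none =>
      let parts := PySem.Chars.splitOn fl ['.']
      if 2 ≤ parts.length then
        -- parts of a split are never empty, so parts[-1] never raises
        some (String.ofList ('.' :: PySem.List.pyGetD parts (-1) []))
      else none

-- ===== PORT B =====
-- the Python set literal _SPECIAL_TLDS (six distinct elements)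
def pvSpecialSet : List (List Char) :=
  [".gov.uk".toList, ".gov.au".toList, ".gov.ca".toList,
   ".ac.uk".toList, ".edu.au".toList, ".edu.cn".toList]

def extract_tld_alt (fqdn : String) : Option String :=
  if fqdn.toList = [] then none
  else
    let parts := PySem.Chars.splitOn (PySem.Chars.lower fqdn.toList) ['.']
    -- the final 'return "." + parts[-1] if len(parts) >= 2 else None'
    let fallback : Option String :=
      if 2 ≤ parts.length then some (String.ofList ('.' :: PySem.List.pyGetD parts (-1) []))
      else none
    if 3 ≤ parts.length then
      let cand := '.' :: PySem.List.pyGetD parts (-2) [] ++ '.' :: PySem.List.pyGetD parts (-1) []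
      if cand ∈ pvSpecialSet then some (String.ofList cand) else fallback
    else fallback

-- ===== PRECONDITION & SPEC =====
def Spec_extract_tld (fqdn : String) (out : Option String) : Prop := out = extract_tld_alt fqdn
instance (fqdn : String) (out : Option String) : Decidable (Spec_extract_tld fqdn out) := by unfold Spec_extract_tld; infer_instance

-- ===== CLAIM (what is proved, stated in full; the proofs are below) =====
def Claim_equal_extract_tld : Prop := ∀ (fqdn : String), Dom_extract_tld fqdn → Spec_extract_tld fqdn (extract_tld fqdn)

-- ===== LEMMAS AND PROOFS =====

-- structural model of fqdn.split(".")
def pvSplitD : List Char → List (List Char)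
  | [] => [[]]
  | c :: rest => if c = '.' then [] :: pvSplitD rest else (pvSplitD rest).modifyHead (fun h => c :: h)

lemma pvSplitD_ne_nil (l : List Char) : pvSplitD l ≠ [] := by
  cases l with
  | nil => simp [pvSplitD]
  | cons c rest =>
    simp only [pvSplitD]
    split_ifs
    · simp
    · cases h : pvSplitD rest with
      | nil => exact absurd h (pvSplitD_ne_nil rest)
      | cons x xs => simp

lemma pvGo_eq (fuel : Nat) : ∀ (l cur : List Char) (acc : List (List Char)), l.length ≤ fuel →
    PySem.Chars.splitOn.go ['.'] fuel l cur acc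
      = acc.reverse ++ (pvSplitD l).modifyHead (fun h => cur.reverse ++ h) := by
  induction fuel with
  | zero =>
    intro l cur acc h
    have : l = [] := by cases l <;> simp_all
    subst this
    simp [PySem.Chars.splitOn.go, pvSplitD]
  | succ fuel ih =>
    intro l cur acc h
    cases l with
    | nil => simp [PySem.Chars.splitOn.go, pvSplitD]
    | cons c rest =>
      rw [PySem.Chars.splitOn.go]
      by_cases hc : c = '.'
      · subst hc
        have hpre : List.isPrefixOf ['.'] ('.' :: rest) = true := by
          simp [List.isPrefixOf]
        simp only [hpre, if_pos]
        rw [ih _ _ _ (by simpa using Nat.le_of_succ_le_succ h)]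
        cases hps : pvSplitD rest with
        | nil => exact absurd hps (pvSplitD_ne_nil rest)
        | cons x xs => simp [pvSplitD, hps]
      · have hpre : List.isPrefixOf ['.'] (c :: rest) = false := by
          simp [List.isPrefixOf]
          intro hcc; exact absurd hcc.symm hc
        simp only [hpre]
        rw [if_neg (by simp)]
        rw [ih _ _ _ (by simpa using Nat.le_of_succ_le_succ h)]
        simp only [pvSplitD, if_neg hc]
        cases hps : pvSplitD rest with
        | nil => exact absurd hps (pvSplitD_ne_nil rest)
        | cons x xs => simp

lemma pvSplitOn_eq (l : List Char) : PySem.Chars.splitOn l ['.'] = pvSplitD l := by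
  rw [PySem.Chars.splitOn, pvGo_eq (l.length + 1) l [] [] (by omega)]
  cases h : pvSplitD l with
  | nil => exact absurd h (pvSplitD_ne_nil l)
  | cons x xs => simp

-- join with '.' (inverse of pvSplitD)
def pvJoinDot : List (List Char) → List Char
  | [] => []
  | [x] => x
  | x :: y :: xs => x ++ '.' :: pvJoinDot (y :: xs)

lemma pvJoinDot_splitD (l : List Char) : pvJoinDot (pvSplitD l) = l := by
  induction l with
  | nil => simp [pvSplitD, pvJoinDot]
  | cons c rest ih =>
    simp only [pvSplitD]
    by_cases hc : c = '.'
    · subst hc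
      rw [if_pos rfl]
      cases h : pvSplitD rest with
      | nil => exact absurd h (pvSplitD_ne_nil rest)
      | cons x xs => rw [h] at ih; simp [pvJoinDot, ih]
    · rw [if_neg hc]
      cases h : pvSplitD rest with
      | nil => exact absurd h (pvSplitD_ne_nil rest)
      | cons x xs =>
        rw [h] at ih
        cases xs with
        | nil => simpa [pvJoinDot] using congrArg (c :: ·) ih
        | cons y ys => simpa [pvJoinDot, List.modifyHead] using congrArg (c :: ·) ih

lemma pvSplitD_dotfree (l : List Char) (h : '.' ∉ l) : pvSplitD l = [l] := by
  induction l with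
  | nil => simp [pvSplitD]
  | cons c rest ih =>
    simp only [pvSplitD]
    rw [if_neg (by intro hc; exact h (hc ▸ List.mem_cons_self))]
    rw [ih (fun hm => h (List.mem_cons_of_mem _ hm))]
    simp [List.modifyHead]

lemma pvSplitD_append_dot (u v : List Char) :
    pvSplitD (u ++ '.' :: v) = pvSplitD u ++ pvSplitD v := by
  induction u with
  | nil => simp [pvSplitD]
  | cons c rest ih =>
    simp only [List.cons_append, pvSplitD]
    by_cases hc : c = '.'
    · simp [hc, ih]
    · rw [if_neg hc, if_neg hc, ih]
      cases h : pvSplitD rest with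
      | nil => exact absurd h (pvSplitD_ne_nil rest)
      | cons x xs => simp

lemma pvMem_splitD_dotfree (l : List Char) : ∀ p ∈ pvSplitD l, '.' ∉ p := by
  induction l with
  | nil => simp [pvSplitD]
  | cons c rest ih =>
    simp only [pvSplitD]
    by_cases hc : c = '.'
    · simp only [hc]
      intro p hp
      rcases List.mem_cons.mp hp with h | h
      · subst h; simp
      · exact ih p h
    · rw [if_neg hc]
      intro p hp
      cases h : pvSplitD rest with
      | nil => exact absurd h (pvSplitD_ne_nil rest)
      | cons x xs =>
        rw [h] at hp
        simp only [List.modifyHead] at hp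
        rcases List.mem_cons.mp hp with h' | h'
        · subst h'
          intro hmem
          rcases List.mem_cons.mp hmem with h'' | h''
          · exact hc h''.symm
          · exact ih x (h ▸ List.mem_cons_self) h''
        · exact ih p (h ▸ List.mem_cons_of_mem _ h')

lemma pvJoinDot_append (ps qs : List (List Char)) (hps : ps ≠ []) (hqs : qs ≠ []) :
    pvJoinDot (ps ++ qs) = pvJoinDot ps ++ '.' :: pvJoinDot qs := by
  induction ps with
  | nil => exact absurd rfl hps
  | cons x xs ih =>
    cases xs with
    | nil =>
      cases qs with
      | nil => exact absurd rfl hqs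
      | cons y ys => simp [pvJoinDot]
    | cons y ys =>
      have := ih (by simp)
      simp only [List.cons_append, pvJoinDot] at *
      rw [this]
      simp

-- the core characterisation: a suffix '.a.b' (a, b dot-free) ⟺ split ends in [a, b] with ≥ 3 parts
lemma pvSuffix_iff (a b L : List Char) (ha : '.' ∉ a) (hb : '.' ∉ b) :
    ('.' :: a ++ '.' :: b) <:+ L ↔ ∃ ps, ps ≠ [] ∧ pvSplitD L = ps ++ [a, b] := by
  constructor
  · rintro ⟨u, rfl⟩
    refine ⟨pvSplitD u, pvSplitD_ne_nil u, ?_⟩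
    have : u ++ ('.' :: a ++ '.' :: b) = (u ++ '.' :: a) ++ '.' :: b := by simp
    rw [this, pvSplitD_append_dot, pvSplitD_append_dot, pvSplitD_dotfree a ha,
      pvSplitD_dotfree b hb]
    simp
  · rintro ⟨ps, hps, hsplit⟩
    refine ⟨pvJoinDot ps, ?_⟩
    have := pvJoinDot_splitD L
    rw [hsplit, pvJoinDot_append ps [a, b] hps (by simp)] at this
    rw [← this]
    simp [pvJoinDot]

lemma pvEnds_iff (a b L : List Char) (ha : '.' ∉ a) (hb : '.' ∉ b) :
    PySem.Chars.endswith L ('.' :: a ++ '.' :: b) = true ↔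
      ∃ ps, ps ≠ [] ∧ pvSplitD L = ps ++ [a, b] :=
  (PySem.Chars.endswith_iff _ _).trans (pvSuffix_iff a b L ha hb)

lemma pvEndsFalse (a b L : List Char) (ha : '.' ∉ a) (hb : '.' ∉ b)
    (h3 : ¬ 3 ≤ (pvSplitD L).length) : PySem.Chars.endswith L ('.' :: a ++ '.' :: b) = false := by
  rw [Bool.eq_false_iff]
  intro hend
  obtain ⟨ps', hps', hsp⟩ := (pvEnds_iff a b L ha hb).mp hend
  apply h3
  rw [hsp]
  have := List.length_pos_iff.mpr hps'
  simp
  omega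

-- unique last-two decomposition
lemma pvDecomp_unique (xs ps ps' : List (List Char)) (a b a' b' : List Char)
    (h : xs = ps ++ [a, b]) (h' : xs = ps' ++ [a', b']) : a = a' ∧ b = b' := by
  have hlen : ps.length = ps'.length := by
    have h1 := congrArg List.length h
    have h2 := congrArg List.length h'
    simp at h1 h2
    omega
  have heq : ps ++ [a, b] = ps' ++ [a', b'] := h ▸ h'
  have := List.append_inj heq hlen
  simp at this
  exact ⟨this.2.1, this.2.2⟩

-- a candidate string '.u.v' with dot-free labels determines its labels
lemma pvCandInj (u v a b : List Char) (hu : '.' ∉ u) (hv : '.' ∉ v)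
    (ha : '.' ∉ a) (hb : '.' ∉ b)
    (h : '.' :: u ++ '.' :: v = '.' :: a ++ '.' :: b) : u = a ∧ v = b := by
  have h1 : pvSplitD ('.' :: u ++ '.' :: v) = [[], u, v] := by
    simp [pvSplitD, pvSplitD_append_dot, pvSplitD_dotfree u hu, pvSplitD_dotfree v hv]
  have h2 : pvSplitD ('.' :: a ++ '.' :: b) = [[], a, b] := by
    simp [pvSplitD, pvSplitD_append_dot, pvSplitD_dotfree a ha, pvSplitD_dotfree b hb]
  have := h1.symm.trans ((congrArg pvSplitD h).trans h2)
  simp at this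
  exact ⟨this.1, this.2⟩

-- last-two elements of a list of length ≥ 3
lemma pvLastTwo (xs : List (List Char)) (h : 3 ≤ xs.length) :
    ∃ ps u v, ps ≠ [] ∧ xs = ps ++ [u, v] ∧
      PySem.List.pyGetD xs (-2) [] = u ∧ PySem.List.pyGetD xs (-1) [] = v := by
  have h1 : xs.length - 2 < xs.length := by omega
  have h2 : xs.length - 1 < xs.length := by omega
  refine ⟨xs.take (xs.length - 2), xs[xs.length - 2], xs[xs.length - 1], ?_, ?_, ?_, ?_⟩
  · have hlen : (xs.take (xs.length - 2)).length = xs.length - 2 := by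
      rw [List.length_take]; omega
    intro hnil
    rw [hnil] at hlen
    simp at hlen
    omega
  · conv_lhs => rw [← List.take_append_drop (xs.length - 2) xs]
    congr 1
    rw [List.drop_eq_getElem_cons h1]
    rw [show xs.length - 2 + 1 = xs.length - 1 by omega, List.drop_eq_getElem_cons h2]
    rw [show xs.length - 1 + 1 = xs.length by omega, List.drop_length]
  · rw [PySem.List.pyGetD_neg_ofNat xs 2 [] (by omega) (by omega)]
  · rw [PySem.List.pyGetD_neg_ofNat xs 1 [] (by omega) (by omega)]

-- ===== VERDICT (by name: the statement is the Claim_ definition above) =====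
theorem extract_tld_spec : Claim_equal_extract_tld := by
  intro fqdn _
  unfold Spec_extract_tld
  by_cases hemp : fqdn.toList = []
  · simp [extract_tld, extract_tld_alt, hemp]
  · simp only [extract_tld, extract_tld_alt, if_neg hemp, pvSplitOn_eq]
    set L := PySem.Chars.lower fqdn.toList with hL
    set parts := pvSplitD L with hparts
    by_cases h3 : 3 ≤ parts.length
    · obtain ⟨ps, u, v, hps, hdec, hu, hv⟩ := pvLastTwo parts h3
      have humem : u ∈ parts := by rw [hdec]; simp
      have hvmem : v ∈ parts := by rw [hdec]; simp
      have hu' : '.' ∉ u := pvMem_splitD_dotfree L u (by rw [hparts] at humem; exact humem)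
      have hv' : '.' ∉ v := pvMem_splitD_dotfree L v (by rw [hparts] at hvmem; exact hvmem)
      have key : ∀ a b : List Char, '.' ∉ a → '.' ∉ b →
          PySem.Chars.endswith L ('.' :: a ++ '.' :: b)
            = (decide (u = a) && decide (v = b)) := by
        intro a b ha hb
        by_cases hab : u = a ∧ v = b
        · obtain ⟨rfl, rfl⟩ := hab
          simp only [decide_true, Bool.and_self]
          exact (pvEnds_iff u v L ha hb).mpr ⟨ps, hps, by rw [← hparts]; exact hdec⟩
        · have hrhs : (decide (u = a) && decide (v = b)) = false := by
            rcases not_and_or.mp hab with h | h <;> simp [h]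
          rw [hrhs, Bool.eq_false_iff]
          intro hends
          obtain ⟨ps', hps', hsp⟩ := (pvEnds_iff a b L ha hb).mp hends
          exact hab (pvDecomp_unique (pvSplitD L) ps ps' u v a b (by rw [← hparts]; exact hdec) hsp)
      have e1 : PySem.Chars.endswith L ['.', 'g', 'o', 'v', '.', 'u', 'k']
          = (decide (u = ['g', 'o', 'v']) && decide (v = ['u', 'k'])) :=
        key ['g', 'o', 'v'] ['u', 'k'] (by decide) (by decide)
      have e2 : PySem.Chars.endswith L ['.', 'g', 'o', 'v', '.', 'a', 'u']
          = (decide (u = ['g', 'o', 'v']) && decide (v = ['a', 'u'])) :=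
        key ['g', 'o', 'v'] ['a', 'u'] (by decide) (by decide)
      have e3 : PySem.Chars.endswith L ['.', 'g', 'o', 'v', '.', 'c', 'a']
          = (decide (u = ['g', 'o', 'v']) && decide (v = ['c', 'a'])) :=
        key ['g', 'o', 'v'] ['c', 'a'] (by decide) (by decide)
      have e4 : PySem.Chars.endswith L ['.', 'a', 'c', '.', 'u', 'k']
          = (decide (u = ['a', 'c']) && decide (v = ['u', 'k'])) :=
        key ['a', 'c'] ['u', 'k'] (by decide) (by decide)
      have e5 : PySem.Chars.endswith L ['.', 'e', 'd', 'u', '.', 'a', 'u']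
          = (decide (u = ['e', 'd', 'u']) && decide (v = ['a', 'u'])) :=
        key ['e', 'd', 'u'] ['a', 'u'] (by decide) (by decide)
      have e6 : PySem.Chars.endswith L ['.', 'e', 'd', 'u', '.', 'c', 'n']
          = (decide (u = ['e', 'd', 'u']) && decide (v = ['c', 'n'])) :=
        key ['e', 'd', 'u'] ['c', 'n'] (by decide) (by decide)
      rw [hu, hv]
      by_cases hc : ('.' :: u ++ '.' :: v) ∈ pvSpecialSet
      · have hc' := hc
        simp only [pvSpecialSet, List.mem_cons, List.not_mem_nil, or_false] at hc'
        rcases hc' with hcq | hcq | hcq | hcq | hcq | hcq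
        · obtain ⟨rfl, rfl⟩ := pvCandInj u v ['g', 'o', 'v'] ['u', 'k'] hu' hv'
            (by decide) (by decide) (by rw [hcq]; decide)
          simp [pvTldLoop, pvSpecials, e1, h3]
          decide
        · obtain ⟨rfl, rfl⟩ := pvCandInj u v ['g', 'o', 'v'] ['a', 'u'] hu' hv'
            (by decide) (by decide) (by rw [hcq]; decide)
          simp [pvTldLoop, pvSpecials, e1, e2, h3]
          decide
        · obtain ⟨rfl, rfl⟩ := pvCandInj u v ['g', 'o', 'v'] ['c', 'a'] hu' hv'
            (by decide) (by decide) (by rw [hcq]; decide)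
          simp [pvTldLoop, pvSpecials, e1, e2, e3, h3]
          decide
        · obtain ⟨rfl, rfl⟩ := pvCandInj u v ['a', 'c'] ['u', 'k'] hu' hv'
            (by decide) (by decide) (by rw [hcq]; decide)
          simp [pvTldLoop, pvSpecials, e1, e2, e3, e4, h3]
          decide
        · obtain ⟨rfl, rfl⟩ := pvCandInj u v ['e', 'd', 'u'] ['a', 'u'] hu' hv'
            (by decide) (by decide) (by rw [hcq]; decide)
          simp [pvTldLoop, pvSpecials, e1, e2, e3, e4, e5, h3]
          decide
        · obtain ⟨rfl, rfl⟩ := pvCandInj u v ['e', 'd', 'u'] ['c', 'n'] hu' hv'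
            (by decide) (by decide) (by rw [hcq]; decide)
          simp [pvTldLoop, pvSpecials, e1, e2, e3, e4, e5, e6, h3]
          decide
      ·
        have n1 : ¬(u = ['g', 'o', 'v'] ∧ v = ['u', 'k']) := by
          rintro ⟨rfl, rfl⟩; exact hc (by decide)
        have f1 : (decide (u = ['g', 'o', 'v']) && decide (v = ['u', 'k'])) = false := by
          rcases not_and_or.mp n1 with h | h <;> simp [h]
        have n2 : ¬(u = ['g', 'o', 'v'] ∧ v = ['a', 'u']) := by
          rintro ⟨rfl, rfl⟩; exact hc (by decide)
        have f2 : (decide (u = ['g', 'o', 'v']) && decide (v = ['a', 'u'])) = false := by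
          rcases not_and_or.mp n2 with h | h <;> simp [h]
        have n3 : ¬(u = ['g', 'o', 'v'] ∧ v = ['c', 'a']) := by
          rintro ⟨rfl, rfl⟩; exact hc (by decide)
        have f3 : (decide (u = ['g', 'o', 'v']) && decide (v = ['c', 'a'])) = false := by
          rcases not_and_or.mp n3 with h | h <;> simp [h]
        have n4 : ¬(u = ['a', 'c'] ∧ v = ['u', 'k']) := by
          rintro ⟨rfl, rfl⟩; exact hc (by decide)
        have f4 : (decide (u = ['a', 'c']) && decide (v = ['u', 'k'])) = false := by
          rcases not_and_or.mp n4 with h | h <;> simp [h]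
        have n5 : ¬(u = ['e', 'd', 'u'] ∧ v = ['a', 'u']) := by
          rintro ⟨rfl, rfl⟩; exact hc (by decide)
        have f5 : (decide (u = ['e', 'd', 'u']) && decide (v = ['a', 'u'])) = false := by
          rcases not_and_or.mp n5 with h | h <;> simp [h]
        have n6 : ¬(u = ['e', 'd', 'u'] ∧ v = ['c', 'n']) := by
          rintro ⟨rfl, rfl⟩; exact hc (by decide)
        have f6 : (decide (u = ['e', 'd', 'u']) && decide (v = ['c', 'n'])) = false := by
          rcases not_and_or.mp n6 with h | h <;> simp [h]
        simp [pvTldLoop, pvSpecials, e1, e2, e3, e4, e5, e6, f1, f2, f3, f4, f5, f6, h3]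
        intro hmem
        exact absurd hmem (by simpa using hc)
    · have hno : ¬ 3 ≤ (pvSplitD L).length := by rw [← hparts]; exact h3
      have f1 : PySem.Chars.endswith L ['.', 'g', 'o', 'v', '.', 'u', 'k'] = false :=
        pvEndsFalse ['g', 'o', 'v'] ['u', 'k'] L (by decide) (by decide) hno
      have f2 : PySem.Chars.endswith L ['.', 'g', 'o', 'v', '.', 'a', 'u'] = false :=
        pvEndsFalse ['g', 'o', 'v'] ['a', 'u'] L (by decide) (by decide) hno
      have f3 : PySem.Chars.endswith L ['.', 'g', 'o', 'v', '.', 'c', 'a'] = false :=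
        pvEndsFalse ['g', 'o', 'v'] ['c', 'a'] L (by decide) (by decide) hno
      have f4 : PySem.Chars.endswith L ['.', 'a', 'c', '.', 'u', 'k'] = false :=
        pvEndsFalse ['a', 'c'] ['u', 'k'] L (by decide) (by decide) hno
      have f5 : PySem.Chars.endswith L ['.', 'e', 'd', 'u', '.', 'a', 'u'] = false :=
        pvEndsFalse ['e', 'd', 'u'] ['a', 'u'] L (by decide) (by decide) hno
      have f6 : PySem.Chars.endswith L ['.', 'e', 'd', 'u', '.', 'c', 'n'] = false :=
        pvEndsFalse ['e', 'd', 'u'] ['c', 'n'] L (by decide) (by decide) hno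
      simp [pvTldLoop, pvSpecials, f1, f2, f3, f4, f5, f6, h3]
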